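-- pv_equiv track=rewrite | github.com/MaxAFriedrich/whisper_dictate | main.py | check_for_repeating_chars
-- ===== SOURCE A (Python) =====
-- def check_for_repeating_chars(text):
--     words = text.split()
--     if len(words) == 0:
--         return False
--     first_word = words[0]
--     for word in words[1:]:
--         if word != first_word:
--             return False  # Words are not all the same
--     return True  # All words are the same
-- ===== SOURCE B (Python) =====
-- def check_for_repeating_chars(text):
--     return len(set(text.split())) == 1
-- ===== Notes on version B (the rewrite author's own statement) =====
-- stated objective: idiomatic
-- what changed: Replaced the explicit first-word/early-exit loop with a single set comprehension: deduplicate all words once and test that exactly one distinct word remains (the empty case falls out as cardinality 0).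
import Mathlib
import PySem

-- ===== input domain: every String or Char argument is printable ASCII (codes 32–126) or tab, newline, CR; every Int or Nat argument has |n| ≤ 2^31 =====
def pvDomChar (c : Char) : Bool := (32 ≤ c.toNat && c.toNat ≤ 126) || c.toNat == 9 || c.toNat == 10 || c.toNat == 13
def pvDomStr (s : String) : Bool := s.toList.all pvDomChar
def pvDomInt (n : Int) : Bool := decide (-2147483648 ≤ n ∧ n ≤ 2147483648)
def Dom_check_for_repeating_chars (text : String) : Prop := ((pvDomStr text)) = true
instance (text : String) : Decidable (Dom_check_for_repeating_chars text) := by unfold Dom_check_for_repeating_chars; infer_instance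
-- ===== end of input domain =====

-- B replaces A's first-word comparison loop with a set cardinality test (idiomatic, same cost).

-- ===== PORT A =====
-- the 'for word in words[1:]' loop with its early return
def chkLoop (first_word : String) : List String → Bool
  | [] => true
  | word :: rest => if word ≠ first_word then false else chkLoop first_word rest

def check_for_repeating_chars (text : String) : Bool :=
  let words := PySem.Str.split₀ text
  if words.length = 0 then false
  else
    let first_word := words.headI
    chkLoop first_word (words.drop 1)

-- ===== PORT B =====
def check_for_repeating_chars_alt (text : String) : Bool :=
  PySem.Set.len (PySem.Set.ofList (PySem.Str.split₀ text)) == 1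

-- ===== PRECONDITION & SPEC =====
def Spec_check_for_repeating_chars (text : String) (out : Bool) : Prop := out = check_for_repeating_chars_alt text
instance (text : String) (out : Bool) : Decidable (Spec_check_for_repeating_chars text out) := by unfold Spec_check_for_repeating_chars; infer_instance

-- ===== CLAIM (what is proved, stated in full; the proofs are below) =====
def Claim_equal_check_for_repeating_chars : Prop := ∀ (text : String), Dom_check_for_repeating_chars text → Spec_check_for_repeating_chars text (check_for_repeating_chars text)

-- ===== LEMMAS AND PROOFS =====

theorem len_foldl_add_ge (ws : List String) (s : PySem.Set String) :
    s.length ≤ (ws.foldl PySem.Set.add s).length := by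
  induction ws generalizing s with
  | nil => simp
  | cons w ws ih =>
    simp only [List.foldl_cons]
    refine le_trans ?_ (ih (PySem.Set.add s w))
    simp only [PySem.Set.add]
    split <;> simp

theorem chkLoop_eq (rest : List String) (first : String) :
    chkLoop first rest = decide ((rest.foldl PySem.Set.add [first]).length = 1) := by
  induction rest with
  | nil => simp [chkLoop]
  | cons w ws ih =>
    by_cases h : w = first
    · subst h
      have : PySem.Set.add [w] w = [w] := by simp [PySem.Set.add, PySem.Set.contains]
      simp only [chkLoop, List.foldl_cons, this, ih]
      simp
    · have hadd : PySem.Set.add [first] w = [first, w] := by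
        simp [PySem.Set.add, PySem.Set.contains, h]
      have hge := len_foldl_add_ge ws [first, w]
      simp only [chkLoop, List.foldl_cons, hadd]
      simp only [List.length_cons, List.length_nil] at hge
      have : ¬ ((ws.foldl PySem.Set.add [first, w]).length = 1) := by omega
      simp [h, this]

-- ===== VERDICT (by name: the statement is the Claim_ definition above) =====
theorem check_for_repeating_chars_spec : Claim_equal_check_for_repeating_chars := by
  intro text _
  unfold Spec_check_for_repeating_chars check_for_repeating_chars check_for_repeating_chars_alt
  cases h : PySem.Str.split₀ text with
  | nil => simp [PySem.Set.ofList, PySem.Set.len]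
  | cons first rest =>
    simp only [List.length_cons, List.headI, List.drop_one, List.tail_cons,
      PySem.Set.ofList_eq_foldl, List.foldl_cons, PySem.Set.len]
    have hb : PySem.Set.add ([] : PySem.Set String) first = [first] := by
      simp [PySem.Set.add, PySem.Set.contains]
    rw [if_neg (by simp), hb, chkLoop_eq]
    rcases eq_or_ne (List.foldl PySem.Set.add [first] rest).length 1 with h1 | h1 <;>
      simp [h1]
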